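-- pv_equiv track=rewrite | github.com/seoym3919/STO2_PIPELINE | ICA_reduc0.py | ExpandMask
-- ===== SOURCE A (Python) =====
-- def ExpandMask(input, iters):
-- 	"""
-- 	Expands the True area in an array 'input'.
-- 	Expansion occurs in the horizontal and vertical directions by one
-- 	cell, and is repeated 'iters' times.
-- 	"""
-- 	Len = len(input)
-- 	output = input.copy()
-- 	for iter in range(0,iters):
-- 		for y in range(1,Len-1):
-- 			if (input[y]):
-- 				output[y-1] = True
-- 				output[y]   = True
-- 				output[y+1] = True
-- 		input = output.copy()
-- 	return output
-- ===== SOURCE B (Python) =====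
-- def _scan(src, big):
--     # per position: distance to nearest True at or before it, capped at big
--     out = []
--     d = big
--     for s in src:
--         d = 0 if s else min(d + 1, big)
--         out.append(d)
--     return out
--
-- def ExpandMask(input, iters):
--     Len = len(input)
--     t = min(iters, Len - 1)          # a nearest-source distance never exceeds Len-1
--     if t < 0:
--         return input.copy()
--     src = [0 < i < Len - 1 and v for i, v in enumerate(input)]   # only interior Trues expand
--     big = Len + 2                    # sentinel: farther than any real distance
--     left = _scan(src, big)
--     right = _scan(src[::-1], big)[::-1]
--     return [v or left[i] <= t or right[i] <= t for i, v in enumerate(input)]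
-- ===== Notes on version B (the rewrite author's own statement) =====
-- stated objective: faster
-- what changed: A dilates the mask by one cell per iteration, rescanning the whole array iters times; B computes, in one forward and one backward pass, each cell's distance to the nearest interior True and marks cells whose distance is at most min(iters, Len-1).
import Mathlib
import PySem

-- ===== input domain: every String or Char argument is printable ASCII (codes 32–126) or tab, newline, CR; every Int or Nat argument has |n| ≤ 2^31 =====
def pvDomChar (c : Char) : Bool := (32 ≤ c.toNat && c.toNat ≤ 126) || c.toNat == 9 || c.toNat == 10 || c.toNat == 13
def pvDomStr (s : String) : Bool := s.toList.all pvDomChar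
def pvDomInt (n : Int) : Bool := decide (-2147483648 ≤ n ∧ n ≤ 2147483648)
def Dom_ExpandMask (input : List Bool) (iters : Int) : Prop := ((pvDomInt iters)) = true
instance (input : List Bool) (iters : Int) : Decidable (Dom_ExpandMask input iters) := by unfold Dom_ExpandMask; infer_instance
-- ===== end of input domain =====

-- B replaces the iterated O(iters·Len) dilation by a two-pass nearest-interior-True distance scan, O(Len).
-- A copies its list argument and never mutates the caller's list; equivalence is about the return value.

-- ===== PORT A =====
-- inner 'for y in range(1, Len-1)' loop; all indices y-1, y, y+1 are in range, so pyGetD/pySetD are exact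
def innerLoopA (Len : Int) (inp out : List Bool) : List Bool :=
  (PySem.List.pyRange 1 (Len - 1) 1).foldl
    (fun out y =>
      if PySem.List.pyGetD inp y false then
        PySem.List.pySetD (PySem.List.pySetD (PySem.List.pySetD out (y - 1) true) y true) (y + 1) true
      else out) out

def ExpandMask (input : List Bool) (iters : Int) : List Bool :=
  let Len : Int := input.length
  ((PySem.List.pyRange 0 iters 1).foldl
    (fun (st : List Bool × List Bool) _ =>
      let output := innerLoopA Len st.1 st.2
      (output, output)) (input, input)).2

-- ===== PORT B =====
-- running 'd = 0 if s else min(d+1, big)' append-loop of Source B's _scan, as structural recursion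
def scanB (big : Int) : List Bool → Int → List Int
  | [], _ => []
  | s :: rest, d =>
    let d' := if s then (0 : Int) else min (d + 1) big
    d' :: scanB big rest d'

def ExpandMask_alt (input : List Bool) (iters : Int) : List Bool :=
  let Len : Int := input.length
  let t := min iters (Len - 1)
  if t < 0 then input
  else
    -- src[i] = (0 < i < Len-1 and input[i]); src[::-1] is reverse (PySem.List.slice?_none_none_neg_one)
    let src := (PySem.List.enumerate input 0).map (fun p => decide (0 < p.1 ∧ p.1 < Len - 1) && p.2)
    let big := Len + 2
    let left := scanB big src big
    let right := (scanB big src.reverse big).reverse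
    (PySem.List.enumerate input 0).map
      (fun p => p.2 || decide (PySem.List.pyGetD left p.1 big ≤ t)
                    || decide (PySem.List.pyGetD right p.1 big ≤ t))

-- ===== PRECONDITION & SPEC =====
def Spec_ExpandMask (input : List Bool) (iters : Int) (out : List Bool) : Prop := out = ExpandMask_alt input iters
instance (input : List Bool) (iters : Int) (out : List Bool) : Decidable (Spec_ExpandMask input iters out) := by unfold Spec_ExpandMask; infer_instance

-- ===== CLAIM (what is proved, stated in full; the proofs are below) =====
def Claim_equal_ExpandMask : Prop := ∀ (input : List Bool) (iters : Int), Dom_ExpandMask input iters → Spec_ExpandMask input iters (ExpandMask input iters)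

-- ===== LEMMAS AND PROOFS =====

-- 'input[i] is True, or some interior True of input lies within distance k of i'
def NearP (m : List Bool) (k : Nat) (i : Nat) : Prop :=
  m.getD i false = true ∨
    ∃ j < m.length, 1 ≤ j ∧ j + 1 < m.length ∧ m.getD j false = true ∧ i ≤ j + k ∧ j ≤ i + k

-- Bool form of NearP
def nearB (m : List Bool) (k : Nat) (i : Nat) : Bool :=
  m.getD i false ||
    (List.range m.length).any (fun j =>
      decide (1 ≤ j) && decide (j + 1 < m.length) && m.getD j false &&
      decide (i ≤ j + k) && decide (j ≤ i + k))

-- the common characterisation both ports are proved equal to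
def maskSpec (m : List Bool) (k : Nat) : List Bool :=
  (List.range m.length).map (fun i => nearB m k i)

lemma nearB_iff (m : List Bool) (k i : Nat) : nearB m k i = true ↔ NearP m k i := by
  simp [nearB, NearP, List.any_eq_true]
  tauto

-- A's inner loop over Nat indices
def step3 (m out : List Bool) (k : Nat) : List Bool :=
  if m.getD (k + 1) false then ((out.set k true).set (k + 1) true).set (k + 2) true else out

def F (L : Nat) (m : List Bool) : List Bool := (List.range (L - 2)).foldl (step3 m) m


lemma getD_set_true (l : List Bool) (n i : Nat) :
    (l.set n true).getD i false = ((decide (i = n) && decide (n < l.length)) || l.getD i false) := by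
  by_cases h : i = n
  · subst h
    by_cases h2 : i < l.length
    · simp [h2, List.getD_eq_getElem?_getD]
    · rw [List.set_eq_of_length_le (by omega)]; simp [h2]
  · simp [h, List.getD_eq_getElem?_getD, List.getElem?_set_ne (fun hh => h hh.symm)]

lemma step3_length (m out : List Bool) (k : Nat) : (step3 m out k).length = out.length := by
  unfold step3; split <;> simp

lemma foldl_step3_length (m : List Bool) (ys : List Nat) (out : List Bool) :
    (ys.foldl (step3 m) out).length = out.length := by
  induction ys generalizing out with
  | nil => rfl
  | cons k ys ih => rw [List.foldl_cons, ih, step3_length]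

lemma foldl_step3_getD (m : List Bool) (ys : List Nat) (out : List Bool) (i : Nat)
    (hys : ∀ k ∈ ys, k + 2 < out.length) :
    (ys.foldl (step3 m) out).getD i false =
      (out.getD i false ||
        ys.any (fun k => m.getD (k + 1) false &&
          (decide (i = k) || decide (i = k + 1) || decide (i = k + 2)))) := by
  induction ys generalizing out with
  | nil => simp
  | cons k ys ih =>
    rw [List.foldl_cons, ih _ (by intro a ha; rw [step3_length]; exact hys a (by simp [ha]))]
    have hk : k + 2 < out.length := hys k (by simp)
    unfold step3
    by_cases hm : m.getD (k + 1) false = true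
    · simp only [hm, if_true, List.any_cons, getD_set_true, List.length_set]
      have h0 : k < out.length := by omega
      have h1 : k + 1 < out.length := by omega
      simp only [h0, h1, hk, decide_true, Bool.and_true]
      cases hout : out.getD i false <;>
        by_cases e0 : i = k <;> by_cases e1 : i = k + 1 <;> by_cases e2 : i = k + 2 <;>
          simp [e0, e1, e2]
    · simp only [Bool.not_eq_true] at hm
      simp [List.getD_eq_getElem?_getD] at hm ⊢
      simp [hm]

lemma maskSpec_length (m : List Bool) (k : Nat) : (maskSpec m k).length = m.length := by
  simp [maskSpec]

lemma maskSpec_getD (m : List Bool) (k j : Nat) (hj : j < m.length) :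
    (maskSpec m k).getD j false = nearB m k j := by
  unfold maskSpec
  rw [List.getD_eq_getElem _ _ (by simpa using hj), List.getElem_map, List.getElem_range]

lemma F_eq_maskSpec (m : List Bool) : F m.length m = maskSpec m 1 := by
  apply List.ext_getElem
  · unfold F maskSpec; rw [foldl_step3_length]; simp
  · intro i h1 h2
    have hlen : (F m.length m).length = m.length := by unfold F; rw [foldl_step3_length]
    have hi : i < m.length := by rwa [hlen] at h1
    rw [← List.getD_eq_getElem _ false h1, ← List.getD_eq_getElem _ false h2,
        maskSpec_getD m 1 i hi]
    unfold F
    rw [foldl_step3_getD m _ _ _ (by intro k hk; simp at hk; omega)]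
    rw [Bool.eq_iff_iff, nearB_iff]
    unfold NearP
    simp only [Bool.or_eq_true, List.any_eq_true, List.mem_range, Bool.and_eq_true,
      decide_eq_true_eq]
    constructor
    · rintro (h | ⟨k, hk, hm, hor⟩)
      · exact Or.inl h
      · exact Or.inr ⟨k + 1, by omega, by omega, by omega, hm, by omega, by omega⟩
    · rintro (h | ⟨j, hj, h1j, h2j, hmj, hle1, hle2⟩)
      · exact Or.inl h
      · exact Or.inr ⟨j - 1, by omega, by rwa [show j - 1 + 1 = j by omega], by omega⟩

lemma maskSpec_zero (m : List Bool) : maskSpec m 0 = m := by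
  apply List.ext_getElem
  · simp [maskSpec]
  · intro i h1 h2
    unfold maskSpec
    rw [List.getElem_map, List.getElem_range, ← List.getD_eq_getElem _ false h2]
    rw [Bool.eq_iff_iff, nearB_iff]
    unfold NearP
    constructor
    · rintro (h | ⟨j, hj, hj1, hj2, hg, a, b⟩)
      · exact h
      · have : j = i := by omega
        subst this; exact hg
    · intro h; exact Or.inl h

lemma nearB_compose (m : List Bool) (n i : Nat) (hi : i < m.length) :
    nearB (maskSpec m n) 1 i = nearB m (n + 1) i := by
  rw [Bool.eq_iff_iff, nearB_iff, nearB_iff]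
  constructor
  · rintro (h | ⟨j, hj, h1, h2, hget, hle1, hle2⟩)
    · rw [maskSpec_getD m n i hi, nearB_iff] at h
      rcases h with h | ⟨j, hj, h1, h2, hg, a, b⟩
      · exact Or.inl h
      · exact Or.inr ⟨j, hj, h1, h2, hg, by omega, by omega⟩
    · rw [maskSpec_length] at hj h2
      rw [maskSpec_getD m n j (by omega), nearB_iff] at hget
      rcases hget with h | ⟨j', hj', h1', h2', hg', a', b'⟩
      · exact Or.inr ⟨j, hj, h1, h2, h, by omega, by omega⟩
      · exact Or.inr ⟨j', hj', h1', h2', hg', by omega, by omega⟩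
  · rintro (h | ⟨j, hj, h1, h2, hget, hle1, hle2⟩)
    · refine Or.inl ?_
      rw [maskSpec_getD m n i hi, nearB_iff]; exact Or.inl h
    · by_cases hnear : i ≤ j + n ∧ j ≤ i + n
      · refine Or.inl ?_
        rw [maskSpec_getD m n i hi, nearB_iff]
        exact Or.inr ⟨j, hj, h1, h2, hget, hnear.1, hnear.2⟩
      · by_cases hlt : i < j
        · refine Or.inr ⟨i + 1, by rw [maskSpec_length]; omega, by omega,
            by rw [maskSpec_length]; omega, ?_, by omega, by omega⟩
          rw [maskSpec_getD m n (i + 1) (by omega), nearB_iff]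
          exact Or.inr ⟨j, hj, h1, h2, hget, by omega, by omega⟩
        · refine Or.inr ⟨i - 1, by rw [maskSpec_length]; omega, by omega,
            by rw [maskSpec_length]; omega, ?_, by omega, by omega⟩
          rw [maskSpec_getD m n (i - 1) (by omega), nearB_iff]
          exact Or.inr ⟨j, hj, h1, h2, hget, by omega, by omega⟩

lemma maskSpec_maskSpec (m : List Bool) (n : Nat) :
    maskSpec (maskSpec m n) 1 = maskSpec m (n + 1) := by
  apply List.ext_getElem
  · simp [maskSpec]
  · intro i h1 h2
    unfold maskSpec
    simp only [List.getElem_map, List.getElem_range]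
    exact nearB_compose m n i (by simpa [maskSpec] using h2)

lemma iter_char (m : List Bool) (n : Nat) : (F m.length)^[n] m = maskSpec m n := by
  induction n with
  | zero => simpa using (maskSpec_zero m).symm
  | succ n ih =>
    rw [Function.iterate_succ_apply', ih]
    have h : m.length = (maskSpec m n).length := (maskSpec_length m n).symm
    rw [h, F_eq_maskSpec, maskSpec_maskSpec]

lemma foldl_diag {α β : Type} (g : β → β → β) (l : List α) (m : β) :
    l.foldl (fun st _ => (g st.1 st.2, g st.1 st.2)) (m, m)
      = ((fun x => g x x)^[l.length] m, (fun x => g x x)^[l.length] m) := by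
  induction l generalizing m with
  | nil => rfl
  | cons a l ih => simp [List.foldl_cons, ih, Function.iterate_succ_apply]

lemma innerLoopA_eq (L : Nat) (inp out : List Bool) :
    innerLoopA (L : Int) inp out = (List.range (L - 2)).foldl (step3 inp) out := by
  unfold innerLoopA
  rw [PySem.List.pyRange_one]
  have h2 : ((L : Int) - 1 - 1).toNat = L - 2 := by omega
  rw [h2, List.foldl_map]
  apply PySem.List.foldl_congr_mem
  intro acc k _
  have e1 : (1 : Int) + (k : Int) = ((k + 1 : Nat) : Int) := by push_cast; ring
  have e2 : (1 : Int) + (k : Int) - 1 = ((k : Nat) : Int) := by ring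
  have e3 : (1 : Int) + (k : Int) + 1 = ((k + 2 : Nat) : Int) := by push_cast; ring
  rw [e2, e3, e1]
  simp only [PySem.List.pyGetD_natCast, PySem.List.pySetD_natCast]
  rfl

lemma A_char (input : List Bool) (iters : Int) :
    ExpandMask input iters = maskSpec input iters.toNat := by
  unfold ExpandMask
  show ((PySem.List.pyRange 0 iters 1).foldl
    (fun (st : List Bool × List Bool) _ =>
      (innerLoopA (input.length : Int) st.1 st.2, innerLoopA (input.length : Int) st.1 st.2))
    (input, input)).2 = _
  rw [foldl_diag, PySem.List.length_pyRange_one]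
  simp only [sub_zero]
  have hfun : (fun x => innerLoopA ((input.length : Nat) : Int) x x) = F input.length := by
    funext x; rw [innerLoopA_eq]; rfl
  rw [hfun]
  exact iter_char input iters.toNat

lemma scanB_length (big : Int) (src : List Bool) (d : Int) :
    (scanB big src d).length = src.length := by
  induction src generalizing d with
  | nil => rfl
  | cons s rest ih => simp [scanB, ih]

lemma scanB_cons (big : Int) (s : Bool) (rest : List Bool) (d : Int) :
    scanB big (s :: rest) d
      = (if s then 0 else min (d + 1) big) :: scanB big rest (if s then 0 else min (d + 1) big) := rfl

lemma scanB_le (big t : Int) (ht0 : 0 ≤ t) (htb : t < big)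
    (src : List Bool) (d : Int) (i : Nat) (hi : i < src.length) (hd : 0 ≤ d) :
    ((scanB big src d).getD i big ≤ t ↔
      (∃ j ≤ i, src.getD j false = true ∧ (i : Int) - j ≤ t) ∨ min (d + i + 1) big ≤ t) := by
  induction src generalizing d i with
  | nil => simp at hi
  | cons s rest ih =>
    by_cases hs : s = true
    · rw [scanB_cons, if_pos hs]
      cases i with
      | zero =>
        rw [List.getD_cons_zero]
        constructor
        · intro _; exact Or.inl ⟨0, le_refl 0, by simp [hs], by omega⟩
        · intro _; omega
      | succ i' =>
        rw [List.getD_cons_succ, ih 0 i' (by simpa using hi) (le_refl 0)]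
        constructor
        · rintro (⟨j, hj, hg, hd'⟩ | h)
          · exact Or.inl ⟨j + 1, by omega, by simpa using hg, by omega⟩
          · exact Or.inl ⟨0, by omega, by simp [hs], by omega⟩
        · rintro (⟨j, hj, hg, hd'⟩ | h)
          · cases j with
            | zero => exact Or.inr (by omega)
            | succ j' => exact Or.inl ⟨j', by omega, by simpa using hg, by omega⟩
          · exact Or.inr (by omega)
    · have hs' : s = false := by simpa using hs
      rw [scanB_cons, if_neg (by simp [hs'])]
      cases i with
      | zero =>
        rw [List.getD_cons_zero]
        constructor
        · intro h; exact Or.inr (by omega)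
        · rintro (⟨j, hj, hg, _⟩ | h)
          · interval_cases j
            simp [hs'] at hg
          · omega
      | succ i' =>
        rw [List.getD_cons_succ, ih (min (d + 1) big) i' (by simpa using hi) (by omega)]
        constructor
        · rintro (⟨j, hj, hg, hd'⟩ | h)
          · exact Or.inl ⟨j + 1, by omega, by simpa using hg, by omega⟩
          · exact Or.inr (by omega)
        · rintro (⟨j, hj, hg, hd'⟩ | h)
          · cases j with
            | zero => simp [hs'] at hg
            | succ j' => exact Or.inl ⟨j', by omega, by simpa using hg, by omega⟩
          · exact Or.inr (by omega)

lemma scan_left (big t : Int) (ht0 : 0 ≤ t) (htb : t < big)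
    (src : List Bool) (i : Nat) (hi : i < src.length) :
    ((scanB big src big).getD i big ≤ t ↔
      ∃ j ≤ i, src.getD j false = true ∧ (i : Int) - j ≤ t) := by
  rw [scanB_le big t ht0 htb src big i hi (by omega)]
  constructor
  · rintro (h | h)
    · exact h
    · exfalso; omega
  · intro h; exact Or.inl h

lemma scan_right (big t : Int) (ht0 : 0 ≤ t) (htb : t < big)
    (src : List Bool) (i : Nat) (hi : i < src.length) :
    ((scanB big src.reverse big).reverse.getD i big ≤ t ↔
      ∃ j, i ≤ j ∧ j < src.length ∧ src.getD j false = true ∧ (j : Int) - i ≤ t) := by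
  have hlen : (scanB big src.reverse big).length = src.length := by
    rw [scanB_length, List.length_reverse]
  have hrev : (scanB big src.reverse big).reverse.getD i big
      = (scanB big src.reverse big).getD (src.length - 1 - i) big := by
    rw [List.getD_eq_getElem _ _ (by simp [hlen]; omega), List.getElem_reverse,
        List.getD_eq_getElem _ _ (by omega)]
    congr 1
    omega
  rw [hrev, scan_left big t ht0 htb _ _ (by simp; omega)]
  constructor
  · rintro ⟨j', hj', hg, hd'⟩
    have hjlt : j' < src.length := by omega
    rw [List.getD_eq_getElem _ _ (by simpa using hjlt), List.getElem_reverse,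
        ← List.getD_eq_getElem _ false (by omega)] at hg
    refine ⟨src.length - 1 - j', by omega, by omega, hg, ?_⟩
    omega
  · rintro ⟨j, hij, hjl, hg, hd'⟩
    refine ⟨src.length - 1 - j, by omega, ?_, ?_⟩
    · rw [List.getD_eq_getElem _ _ (by simp; omega), List.getElem_reverse,
          ← List.getD_eq_getElem _ false (by omega)]
      convert hg using 2
      omega
    · omega

lemma B_char (input : List Bool) (iters : Int) :
    ExpandMask_alt input iters = maskSpec input iters.toNat := by
  unfold ExpandMask_alt
  by_cases ht : min iters ((input.length : Int) - 1) < 0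
  · rw [if_pos ht]
    rcases List.eq_nil_or_concat input with hnil | _
    · subst hnil; simp [maskSpec]
    · have hlen : 1 ≤ input.length := by
        cases input with
        | nil => simp_all
        | cons a l => simp
      have : iters < 0 := by omega
      rw [show iters.toNat = 0 by omega, maskSpec_zero]
  · rw [if_neg ht]
    set L := input.length with hL
    set t := min iters ((L : Int) - 1) with hTdef
    have ht0 : 0 ≤ t := by omega
    have hLpos : 1 ≤ L := by
      by_contra h
      have : L = 0 := by omega
      omega
    have hit0 : 0 ≤ iters := by omega
    set src := (PySem.List.enumerate input 0).map
      (fun p => decide (0 < p.1 ∧ p.1 < (L : Int) - 1) && p.2) with hsrc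
    have hsrclen : src.length = L := by
      rw [hsrc, List.length_map, PySem.List.length_enumerate]
    have hsrcget : ∀ j : Nat, j < L →
        src.getD j false = (decide (0 < (j : Int) ∧ (j : Int) < (L : Int) - 1)
          && input.getD j false) := by
      intro j hj
      rw [hsrc, List.getD_eq_getElem _ _ (by rw [List.length_map, PySem.List.length_enumerate]; exact hj),
          List.getElem_map, PySem.List.getElem_enumerate,
          List.getD_eq_getElem _ false hj]
      norm_num
    have htb : t < (L : Int) + 2 := by omega
    apply List.ext_getElem
    · simp [maskSpec, PySem.List.length_enumerate]
    · intro i h1 h2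
      have hi : i < L := by simpa [PySem.List.length_enumerate] using h1
      rw [List.getElem_map, PySem.List.getElem_enumerate]
      rw [← List.getD_eq_getElem _ false h2, maskSpec_getD input iters.toNat i hi]
      simp only [zero_add]
      rw [show PySem.List.pyGetD (scanB ((L:Int)+2) src ((L:Int)+2)) (i : Int) ((L:Int)+2)
            = (scanB ((L:Int)+2) src ((L:Int)+2)).getD i ((L:Int)+2) from
          PySem.List.pyGetD_natCast _ _ _,
        show PySem.List.pyGetD (scanB ((L:Int)+2) src.reverse ((L:Int)+2)).reverse (i : Int) ((L:Int)+2)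
            = (scanB ((L:Int)+2) src.reverse ((L:Int)+2)).reverse.getD i ((L:Int)+2) from
          PySem.List.pyGetD_natCast _ _ _]
      rw [Bool.eq_iff_iff, nearB_iff]
      simp only [Bool.or_eq_true, decide_eq_true_eq]
      rw [scan_left ((L:Int)+2) t ht0 htb src i (by omega),
          scan_right ((L:Int)+2) t ht0 htb src i (by omega)]
      unfold NearP
      constructor
      · rintro ((hv | ⟨j, hj, hg, hd'⟩) | ⟨j, hij, hjl, hg, hd'⟩)
        · exact Or.inl (by rwa [← List.getD_eq_getElem _ false hi] at hv)
        · rw [hsrcget j (by omega)] at hg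
          simp only [Bool.and_eq_true, decide_eq_true_eq] at hg
          refine Or.inr ⟨j, by omega, by omega, by omega, hg.2, ?_, ?_⟩ <;> omega
        · rw [hsrcget j (by omega)] at hg
          simp only [Bool.and_eq_true, decide_eq_true_eq] at hg
          refine Or.inr ⟨j, by omega, by omega, by omega, hg.2, ?_, ?_⟩ <;> omega
      · rintro (hv | ⟨j, hj, hj1, hj2, hg, a, b⟩)
        · exact Or.inl (Or.inl (by rwa [← List.getD_eq_getElem _ false hi]))
        · have hsg : src.getD j false = true := by
            rw [hsrcget j hj]
            simp only [Bool.and_eq_true, decide_eq_true_eq]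
            exact ⟨⟨by omega, by omega⟩, hg⟩
          by_cases hji : j ≤ i
          · exact Or.inl (Or.inr ⟨j, hji, hsg, by omega⟩)
          · exact Or.inr ⟨j, by omega, by omega, hsg, by omega⟩

theorem ExpandMask_spec : Claim_equal_ExpandMask := by
  intro input iters _
  unfold Spec_ExpandMask
  rw [A_char, B_char]
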